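-- pv_equiv track=rewrite | github.com/ludstuen90/ohio | propertyrecords/utils.py | cuyahoga_county_name_street_parser
-- ===== SOURCE A (Python) =====
-- def cuyahoga_county_name_street_parser(string1, string2):
--     """
--
--         #Split name from earlier line
--     # LOOK FOR PO BOX OR ADDRESS NUMBER
--     # start back from end of first line and look for where the LAST NUMBER ends
--     # but also be able to capture the last single letter if it's a cardinal number
--
--     """
--     name_line_length = (len(string1) -1)
--
--     in_first_line_we_have_encountered_a_digit = False
--
--     for character_num in range(name_line_length, 0, -1):
--         if string1[character_num].isdigit():
--             in_first_line_we_have_encountered_a_digit = True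
--         elif string1[character_num].isspace() and in_first_line_we_have_encountered_a_digit:
--             primary_line = string1[:character_num]
--             secondary_line = f'''{string1[character_num+1:]} {string2}'''
--             return {
--                 'primary_line': primary_line,
--                 'secondary_line': secondary_line
--             }
--
--             # parse digits we have encountered so far as the address number, return that
--
--     # Check for cardinal direction in the last spot
--     cardinal_directions = ['n', 'e', 's', 'w']
--     if string1[-1:].lower() in cardinal_directions and string1[-2:].isspace():
--         return {
--             'primary_line': string1[:-2],
--             'secondary_line': f'''{string1[-2:]} {string2}'''
--         }
--
--     #  Check for PO BOX listed in the first line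
--     if 'PO BOX' in string1[-8:].upper():
--         for character_num in range(name_line_length, 0, -1):
--             if ' PO BOX' in string1[character_num:]:
--                 primary_line = string1[:character_num]
--                 secondary_line = f'''{string1[character_num+1:]} {string2}'''
--                 return {
--                     'primary_line': primary_line,
--                     'secondary_line': secondary_line
--                 }
--
--     # Else just return what we have as the first and second lines, our algorithm is unable to parse
--     else:
--         return{
--             'primary_line': string1,
--             'secondary_line': string2
--         }
-- ===== SOURCE B (Python) =====
-- def cuyahoga_county_name_street_parser(string1, string2):
--     n = len(string1)
--     # address number: last digit position (index 0 excluded), then last blank before it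
--     digit_positions = [i for i in range(1, n) if string1[i].isdigit()]
--     if digit_positions:
--         d = digit_positions[-1]
--         space_positions = [s for s in range(1, d) if string1[s].isspace()]
--         if space_positions:
--             s = space_positions[-1]
--             return {'primary_line': string1[:s],
--                     'secondary_line': f'{string1[s + 1:]} {string2}'}
--     # trailing cardinal direction preceded by whitespace
--     if string1[-1:].lower() in ('n', 'e', 's', 'w') and string1[-2:].isspace():
--         return {'primary_line': string1[:-2],
--                 'secondary_line': f'{string1[-2:]} {string2}'}
--     # PO BOX near the end: split at the start of its last occurrence
--     if 'PO BOX' in string1[-8:].upper():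
--         box_starts = [i for i in range(1, n) if string1.startswith(' PO BOX', i)]
--         if box_starts:
--             i = box_starts[-1]
--             return {'primary_line': string1[:i],
--                     'secondary_line': f'{string1[i + 1:]} {string2}'}
--     return {'primary_line': string1, 'secondary_line': string2}
-- ===== Notes on version B (the rewrite author's own statement) =====
-- stated objective: simpler
-- what changed: A's reverse scan with a seen-a-digit flag becomes 'last digit position, then last whitespace position before it' via two comprehensions, and A's second reverse re-scan testing ' PO BOX' in string1[i:] becomes 'last index where ' PO BOX' starts' via str.startswith, removing the flag state and the repeated substring containment tests.
-- outside the precondition, e.g. on cuyahoga_county_name_street_parser('PO BOX', 'X'): A returns None, B returns {'primary_line': 'PO BOX', 'secondary_line': 'X'}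
import Mathlib
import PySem

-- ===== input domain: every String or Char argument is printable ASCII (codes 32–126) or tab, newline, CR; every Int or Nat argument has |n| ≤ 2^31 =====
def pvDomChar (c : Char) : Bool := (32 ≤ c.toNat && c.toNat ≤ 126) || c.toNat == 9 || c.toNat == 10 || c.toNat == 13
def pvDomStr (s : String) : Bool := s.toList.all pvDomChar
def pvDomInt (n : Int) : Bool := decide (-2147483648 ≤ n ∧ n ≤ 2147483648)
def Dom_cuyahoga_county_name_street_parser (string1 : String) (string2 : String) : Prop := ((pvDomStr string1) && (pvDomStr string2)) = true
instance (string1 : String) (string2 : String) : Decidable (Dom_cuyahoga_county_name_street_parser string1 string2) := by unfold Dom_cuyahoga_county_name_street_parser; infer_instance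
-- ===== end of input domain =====

-- B replaces A's reverse flag-scan by "last digit position, then last blank before it" and A's
-- PO-BOX rescan loop by "last position where ' PO BOX' starts" (objective: simpler decomposition,
-- same cost); equivalence is about the returned dict, proved on Pre_ (A falls off with None
-- exactly on the inputs Pre_ excludes).

-- ===== PORT A =====
-- the dict A returns from the digit branch and the PO-BOX branch: {primary: s1[:i], secondary: f'{s1[i+1:]} {s2}'}
def pvSplitAt (l1 l2 : List Char) (i : Int) : List (String × String) :=
  [("primary_line", String.ofList (PySem.List.slice l1 none (some i))),
   ("secondary_line", String.ofList (PySem.List.slice l1 (some (i + 1)) none ++ ' ' :: l2))]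

-- the first 'for character_num in range(name_line_length, 0, -1)' loop, with its flag
def pvNameLoopA (l1 l2 : List Char) : List Int → Bool → Option (List (String × String))
  | [], _ => none
  | i :: rest, flag =>
    if PySem.Chars.isdigit (PySem.List.pyGetD l1 i ' ') then
      pvNameLoopA l1 l2 rest true
    else if PySem.Chars.isspace (PySem.List.pyGetD l1 i ' ') && flag then
      some (pvSplitAt l1 l2 i)
    else
      pvNameLoopA l1 l2 rest flag

-- the second loop: first (i.e. largest) index whose suffix contains ' PO BOX'
def pvPoLoopA (l1 l2 : List Char) : List Int → Option (List (String × String))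
  | [] => none
  | i :: rest =>
    if PySem.Chars.isIn (" PO BOX".toList) (PySem.List.slice l1 (some i) none) then
      some (pvSplitAt l1 l2 i)
    else
      pvPoLoopA l1 l2 rest

def cuyahoga_county_name_street_parser (string1 : String) (string2 : String) : List (String × String) :=
  let l1 := string1.toList
  let l2 := string2.toList
  let name_line_length : Int := PySem.Chars.len l1 - 1
  match pvNameLoopA l1 l2 (PySem.List.pyRange name_line_length 0 (-1)) false with
  | some r => r
  | none =>
    if [['n'], ['e'], ['s'], ['w']].contains (PySem.Chars.lower (PySem.List.slice l1 (some (-1)) none))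
        && PySem.Chars.strIsspace (PySem.List.slice l1 (some (-2)) none) then
      [("primary_line", String.ofList (PySem.List.slice l1 none (some (-2)))),
       ("secondary_line", String.ofList (PySem.List.slice l1 (some (-2)) none ++ ' ' :: l2))]
    else if PySem.Chars.isIn ("PO BOX".toList) (PySem.Chars.upper (PySem.List.slice l1 (some (-8)) none)) then
      match pvPoLoopA l1 l2 (PySem.List.pyRange name_line_length 0 (-1)) with
      | some r => r
      | none => []   -- Python A falls off both ifs and returns None here; excluded by Pre_
    else
      [("primary_line", string1), ("secondary_line", string2)]

-- ===== PORT B =====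
def pvSplitPair (s1 s2 : String) (i : Int) : List (String × String) :=
  [("primary_line", String.ofList (PySem.List.slice s1.toList none (some i))),
   ("secondary_line", String.ofList (PySem.List.slice s1.toList (some (i + 1)) none ++ ' ' :: s2.toList))]

-- Source B after the digit branch: cardinal check, then split at the last start of ' PO BOX', else fallback
-- (s.startswith(' PO BOX', i) is ported step for step as: the suffix s[i:] starts with ' PO BOX' —
--  exact for the 1 ≤ i < len(s) produced by the range)
def pvUnparsedTail (s1 s2 : String) : List (String × String) :=
  let cs := s1.toList
  if [['n'], ['e'], ['s'], ['w']].contains (PySem.Chars.lower (PySem.List.slice cs (some (-1)) none))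
      && PySem.Chars.strIsspace (PySem.List.slice cs (some (-2)) none) then
    [("primary_line", String.ofList (PySem.List.slice cs none (some (-2)))),
     ("secondary_line", String.ofList (PySem.List.slice cs (some (-2)) none ++ ' ' :: s2.toList))]
  else if PySem.Chars.isIn ("PO BOX".toList) (PySem.Chars.upper (PySem.List.slice cs (some (-8)) none)) then
    match ((PySem.List.pyRange 1 (PySem.Chars.len cs) 1).filter
        (fun i => PySem.Chars.startswith (PySem.List.slice cs (some i) none) (" PO BOX".toList))).getLast? with
    | some i => pvSplitPair s1 s2 i
    | none => [("primary_line", s1), ("secondary_line", s2)]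
  else
    [("primary_line", s1), ("secondary_line", s2)]

def cuyahoga_county_name_street_parser_alt (string1 : String) (string2 : String) : List (String × String) :=
  let cs := string1.toList
  let digitPos := (PySem.List.pyRange 1 (PySem.Chars.len cs) 1).filter
      (fun i => PySem.Chars.isdigit (PySem.List.pyGetD cs i ' '))
  match digitPos.getLast? with
  | some d =>
    let spacePos := (PySem.List.pyRange 1 d 1).filter
        (fun s => PySem.Chars.isspace (PySem.List.pyGetD cs s ' '))
    match spacePos.getLast? with
    | some s => pvSplitPair string1 string2 s
    | none => pvUnparsedTail string1 string2
  | none => pvUnparsedTail string1 string2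

-- ===== PRECONDITION & SPEC =====
-- Pre_ excludes exactly the inputs on which A falls off the dangling if/else and returns None
-- (a value outside the declared dict type): those where no digit-split exists, 'PO BOX' occurs in
-- the upper-cased last 8 characters, but ' PO BOX' starts at no index ≥ 1; B returns the unparsed
-- fallback dict there.
def Pre_cuyahoga_county_name_street_parser (string1 : String) (string2 : String) : Prop :=
  (∃ s ∈ PySem.List.pyRange 1 (string1.toList.length : Int) 1,
      PySem.Chars.isspace (PySem.List.pyGetD string1.toList s ' ') = true ∧
      ∃ q ∈ PySem.List.pyRange 1 (string1.toList.length : Int) 1,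
        s < q ∧ PySem.Chars.isdigit (PySem.List.pyGetD string1.toList q ' ') = true)
  ∨ PySem.Chars.isIn ("PO BOX".toList)
      (PySem.Chars.upper (PySem.List.slice string1.toList (some (-8)) none)) = false
  ∨ (∃ i ∈ PySem.List.pyRange 1 (string1.toList.length : Int) 1,
      PySem.Chars.startswith (PySem.List.slice string1.toList (some i) none) (" PO BOX".toList) = true)
instance (string1 : String) (string2 : String) : Decidable (Pre_cuyahoga_county_name_street_parser string1 string2) := by unfold Pre_cuyahoga_county_name_street_parser; infer_instance

def pvWitness_cuyahoga_county_name_street_parser : String × String := ("A 1", "B")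

def Spec_cuyahoga_county_name_street_parser (string1 : String) (string2 : String) (out : List (String × String)) : Prop := out = cuyahoga_county_name_street_parser_alt string1 string2
instance (string1 : String) (string2 : String) (out : List (String × String)) : Decidable (Spec_cuyahoga_county_name_street_parser string1 string2 out) := by unfold Spec_cuyahoga_county_name_street_parser; infer_instance

-- ===== CLAIM (what is proved, stated in full; the proofs are below) =====
def Claim_equal_cuyahoga_county_name_street_parser : Prop := ∀ (string1 : String) (string2 : String), Dom_cuyahoga_county_name_street_parser string1 string2 → Pre_cuyahoga_county_name_street_parser string1 string2 → Spec_cuyahoga_county_name_street_parser string1 string2 (cuyahoga_county_name_street_parser string1 string2)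

-- ===== LEMMAS AND PROOFS =====

-- a digit is never whitespace
theorem pvDigitNotSpace (c : Char) (h : PySem.Chars.isdigit c = true) :
    PySem.Chars.isspace c = false := by
  simp only [PySem.Chars.isdigit, Bool.and_eq_true, decide_eq_true_eq] at h
  obtain ⟨h1, h2⟩ := h
  have h1' : 48 ≤ c.toNat := h1
  have h2' : c.toNat ≤ 57 := h2
  simp only [PySem.Chars.isspace, Bool.or_eq_false_iff, Bool.and_eq_false_iff,
    decide_eq_false_iff_not]
  omega

-- range(k, 0, -1) is range(1, k+1) reversed
theorem pvDescEqReverse (m : Int) :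
    PySem.List.pyRange (m - 1) 0 (-1) = (PySem.List.pyRange 1 m 1).reverse := by
  have h : (List.range (m - 1).toNat).reverse
      = List.map (fun x => (m - 1).toNat - 1 - x) (List.range (m - 1).toNat) := by
    rw [List.range_eq_range', List.reverse_range', ← List.range_eq_range']
    simp
  rw [PySem.List.pyRange_neg_one, PySem.List.pyRange_one, ← List.map_reverse, h, List.map_map]
  simp only [sub_zero]
  apply List.map_congr_left
  intro x hx
  simp only [List.mem_range] at hx
  simp only [Function.comp_apply]
  omega

-- B's [..][-1] over an ascending range is find? over the descending range
theorem pvGetLastFilter (p : Int → Bool) (m : Int) :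
    ((PySem.List.pyRange 1 m 1).filter p).getLast? = (PySem.List.pyRange (m - 1) 0 (-1)).find? p := by
  rw [pvDescEqReverse, List.getLast?_filter]

theorem pvMemDesc (k : Int) (x : Int) :
    x ∈ PySem.List.pyRange k 0 (-1) ↔ 1 ≤ x ∧ x ≤ k := by
  have h := pvDescEqReverse (k + 1)
  simp only [add_sub_cancel_right] at h
  rw [h, List.mem_reverse, PySem.List.mem_pyRange_one]
  omega

-- find? on the descending range returns the largest satisfying index
theorem pvFindDescMax (p : Int → Bool) : ∀ (k : Nat) (d : Int),
    (PySem.List.pyRange (k : Int) 0 (-1)).find? p = some d →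
    ∀ j : Int, d < j → j ≤ (k : Int) → p j = false := by
  intro k
  induction k with
  | zero =>
    intro d h
    rw [PySem.List.pyRange_neg_one_eq_nil (by omega)] at h
    simp at h
  | succ k ih =>
    intro d h j hdj hjk
    have hc : (((k + 1 : Nat)) : Int) = (k : Int) + 1 := by push_cast; ring
    rw [hc] at h hjk
    rw [PySem.List.pyRange_neg_one_cons (by omega), add_sub_cancel_right] at h
    by_cases hp : p ((k : Int) + 1) = true
    · rw [List.find?_cons_of_pos hp] at h
      have hd1 : (k : Int) + 1 = d := by simpa using h
      omega
    · rw [List.find?_cons_of_neg hp] at h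
      rcases eq_or_lt_of_le hjk with hj | hj
      · rw [hj]
        exact Bool.eq_false_iff.mpr hp
      · exact ih d h j hdj (by omega)

-- A's flag loop: last digit position, then last space position below it
theorem pvNameLoop_eq (l1 l2 : List Char) : ∀ (k : Nat) (flag : Bool),
    pvNameLoopA l1 l2 (PySem.List.pyRange (k : Int) 0 (-1)) flag =
      (if flag then
        ((PySem.List.pyRange (k : Int) 0 (-1)).find?
            (fun i => PySem.Chars.isspace (PySem.List.pyGetD l1 i ' '))).map (pvSplitAt l1 l2)
      else
        match (PySem.List.pyRange (k : Int) 0 (-1)).find?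
            (fun i => PySem.Chars.isdigit (PySem.List.pyGetD l1 i ' ')) with
        | some d =>
            ((PySem.List.pyRange (d - 1) 0 (-1)).find?
                (fun i => PySem.Chars.isspace (PySem.List.pyGetD l1 i ' '))).map (pvSplitAt l1 l2)
        | none => none) := by
  intro k
  induction k with
  | zero =>
    intro flag
    rw [PySem.List.pyRange_neg_one_eq_nil (by omega)]
    cases flag <;> simp [pvNameLoopA]
  | succ k ih =>
    intro flag
    have hc : (((k + 1 : Nat)) : Int) = (k : Int) + 1 := by push_cast; ring
    rw [hc, PySem.List.pyRange_neg_one_cons (by omega), add_sub_cancel_right]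
    simp only [pvNameLoopA]
    by_cases hd : PySem.Chars.isdigit (PySem.List.pyGetD l1 ((k : Int) + 1) ' ') = true
    · have hs := pvDigitNotSpace _ hd
      rw [if_pos hd, ih true, if_pos rfl]
      cases flag
      · rw [if_neg (show ¬(false = true) by decide), List.find?_cons_of_pos (p := fun i => PySem.Chars.isdigit (PySem.List.pyGetD l1 i ' ')) hd]
        simp only [add_sub_cancel_right]
      · rw [if_pos rfl, List.find?_cons_of_neg (p := fun i => PySem.Chars.isspace (PySem.List.pyGetD l1 i ' ')) (by simp [hs])]
    · rw [if_neg hd]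
      by_cases hsf : (PySem.Chars.isspace (PySem.List.pyGetD l1 ((k : Int) + 1) ' ') && flag) = true
      · obtain ⟨hs2, hf⟩ := Bool.and_eq_true_iff.mp hsf
        subst hf
        rw [if_pos hsf, if_pos rfl, List.find?_cons_of_pos (p := fun i => PySem.Chars.isspace (PySem.List.pyGetD l1 i ' ')) hs2]
        rfl
      · rw [if_neg hsf, ih flag]
        cases flag
        · rw [if_neg (show ¬(false = true) by decide), if_neg (show ¬(false = true) by decide),
            List.find?_cons_of_neg (p := fun i => PySem.Chars.isdigit (PySem.List.pyGetD l1 i ' ')) hd]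
        · rw [if_pos rfl, if_pos rfl]
          have hs3 : PySem.Chars.isspace (PySem.List.pyGetD l1 ((k : Int) + 1) ' ') = false := by
            revert hsf
            cases PySem.Chars.isspace (PySem.List.pyGetD l1 ((k : Int) + 1) ' ') <;> simp
          rw [List.find?_cons_of_neg (p := fun i => PySem.Chars.isspace (PySem.List.pyGetD l1 i ' ')) (by simp [hs3])]

-- A's PO-BOX containment scan agrees with B's startswith scan while no occurrence lies above k
theorem pvPoLoop_eq (l1 l2 : List Char) : ∀ (k : Nat),
    (∀ j : Nat, k < j → ¬ (" PO BOX".toList <+: l1.drop j)) →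
    pvPoLoopA l1 l2 (PySem.List.pyRange (k : Int) 0 (-1)) =
      ((PySem.List.pyRange (k : Int) 0 (-1)).find?
          (fun i => PySem.Chars.startswith (PySem.List.slice l1 (some i) none) (" PO BOX".toList))).map
        (pvSplitAt l1 l2) := by
  intro k
  induction k with
  | zero =>
    intro _
    rw [PySem.List.pyRange_neg_one_eq_nil (by omega)]
    simp [pvPoLoopA]
  | succ k ih =>
    intro hk
    have hc : (((k + 1 : Nat)) : Int) = (k : Int) + 1 := by push_cast; ring
    rw [hc, PySem.List.pyRange_neg_one_cons (by omega), add_sub_cancel_right]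
    simp only [pvPoLoopA]
    have hsl : PySem.List.slice l1 (some ((k : Int) + 1)) none = l1.drop (k + 1) := by
      rw [PySem.List.slice_from l1 (a := (k : Int) + 1) (by omega)]
      congr 1
    by_cases hP : PySem.Chars.startswith (PySem.List.slice l1 (some ((k : Int) + 1)) none)
        (" PO BOX".toList) = true
    · have hpre : " PO BOX".toList <+: l1.drop (k + 1) := by
        rw [hsl] at hP
        exact (PySem.Chars.startswith_iff _ _).mp hP
      have hin : PySem.Chars.isIn (" PO BOX".toList)
          (PySem.List.slice l1 (some ((k : Int) + 1)) none) = true := by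
        rw [hsl]
        exact (PySem.Chars.exists_prefix_drop_iff_isIn _ _).mp ⟨0, by simpa using hpre⟩
      rw [if_pos hin, List.find?_cons_of_pos (p := fun i => PySem.Chars.startswith (PySem.List.slice l1 (some i) none) (" PO BOX".toList)) hP]
      rfl
    · have hin : PySem.Chars.isIn (" PO BOX".toList)
          (PySem.List.slice l1 (some ((k : Int) + 1)) none) = false := by
        rw [hsl]
        apply Bool.eq_false_iff.mpr
        intro habs
        obtain ⟨j, hj⟩ :=
          (PySem.Chars.exists_prefix_drop_iff_isIn (" PO BOX".toList) (l1.drop (k + 1))).mpr habs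
        rw [List.drop_drop] at hj
        rcases Nat.eq_zero_or_pos j with hj0 | hj0
        · subst hj0
          exact hP ((PySem.Chars.startswith_iff _ _).mpr (by rw [hsl]; simpa using hj))
        · exact hk (k + 1 + j) (by omega) hj
      rw [if_neg (by rw [hin]; decide), List.find?_cons_of_neg (p := fun i => PySem.Chars.startswith (PySem.List.slice l1 (some i) none) (" PO BOX".toList)) hP]
      apply ih
      intro j hj hpre
      rcases Nat.eq_or_lt_of_le hj with hj1 | hj1
      · have : j = k + 1 := by omega
        subst this
        exact hP ((PySem.Chars.startswith_iff _ _).mpr (by rw [hsl]; exact hpre))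
      · exact hk j (by omega) hpre

-- the common tail after the digit scan failed: cardinal branch, PO-BOX branch, fallback
theorem pvTail_eq (s1 s2 : String) (m : Nat) (hm : s1.toList.length = m + 1)
    (hrest : PySem.Chars.isIn ("PO BOX".toList)
        (PySem.Chars.upper (PySem.List.slice s1.toList (some (-8)) none)) = false
      ∨ ∃ i ∈ PySem.List.pyRange 1 (s1.toList.length : Int) 1,
          PySem.Chars.startswith (PySem.List.slice s1.toList (some i) none) (" PO BOX".toList) = true) :
    (if ([['n'], ['e'], ['s'], ['w']].contains (PySem.Chars.lower (PySem.List.slice s1.toList (some (-1)) none)) &&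
        PySem.Chars.strIsspace (PySem.List.slice s1.toList (some (-2)) none)) = true then
      [("primary_line", String.ofList (PySem.List.slice s1.toList none (some (-2)))),
       ("secondary_line", String.ofList (PySem.List.slice s1.toList (some (-2)) none ++ ' ' :: s2.toList))]
    else if PySem.Chars.isIn ("PO BOX".toList)
        (PySem.Chars.upper (PySem.List.slice s1.toList (some (-8)) none)) = true then
      match pvPoLoopA s1.toList s2.toList (PySem.List.pyRange (m : Int) 0 (-1)) with
      | some r => r
      | none => []
    else [("primary_line", s1), ("secondary_line", s2)]) = pvUnparsedTail s1 s2 := by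
  have hclen : (s1.toList.length : Int) = (m : Int) + 1 := by rw [hm]; push_cast; ring
  unfold pvUnparsedTail
  simp only [PySem.Chars.len_eq]
  by_cases hcard : ([['n'], ['e'], ['s'], ['w']].contains
      (PySem.Chars.lower (PySem.List.slice s1.toList (some (-1)) none)) &&
      PySem.Chars.strIsspace (PySem.List.slice s1.toList (some (-2)) none)) = true
  · rw [if_pos hcard, if_pos hcard]
  · rw [if_neg hcard, if_neg hcard]
    by_cases hpo : PySem.Chars.isIn ("PO BOX".toList)
        (PySem.Chars.upper (PySem.List.slice s1.toList (some (-8)) none)) = true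
    · rw [if_pos hpo, if_pos hpo]
      rw [pvGetLastFilter
        (fun i => PySem.Chars.startswith (PySem.List.slice s1.toList (some i) none) (" PO BOX".toList))
        ((s1.toList.length : Int))]
      rw [show (s1.toList.length : Int) - 1 = (m : Int) by omega]
      rw [pvPoLoop_eq s1.toList s2.toList m ?base]
      case base =>
        intro j hj habs
        rw [List.drop_eq_nil_of_le (by omega)] at habs
        have := habs.length_le
        simp at this
      cases hfind : List.find?
          (fun i => PySem.Chars.startswith (PySem.List.slice s1.toList (some i) none) (" PO BOX".toList))
          (PySem.List.pyRange (m : Int) 0 (-1)) with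
      | some i => rfl
      | none =>
        exfalso
        rcases hrest with h2 | ⟨i, himem, hist⟩
        · rw [hpo] at h2
          exact absurd h2 (by decide)
        · have hmem := PySem.List.mem_pyRange_one.mp himem
          have : i ∈ PySem.List.pyRange (m : Int) 0 (-1) := (pvMemDesc _ _).mpr (by omega)
          exact absurd hist (by simpa using List.find?_eq_none.mp hfind i this)
    · rw [if_neg hpo, if_neg hpo]

-- ===== VERDICT (by name: the statement is the Claim_ definition above) =====
theorem cuyahoga_county_name_street_parser_spec : Claim_equal_cuyahoga_county_name_street_parser := by
  intro s1 s2 _ hpre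
  unfold Spec_cuyahoga_county_name_street_parser
  unfold cuyahoga_county_name_street_parser cuyahoga_county_name_street_parser_alt
  simp only [PySem.Chars.len_eq]
  unfold Pre_cuyahoga_county_name_street_parser at hpre
  rcases Nat.eq_zero_or_pos s1.toList.length with hn0 | hnpos
  · -- empty first line: both sides fall through everywhere
    have hnil := List.length_eq_zero_iff.mp hn0
    rw [hnil]
    unfold pvUnparsedTail
    rw [hnil]
    simp only [List.length_nil, Nat.cast_zero, PySem.Chars.len_eq]
    rw [PySem.List.pyRange_neg_one_eq_nil (by omega), PySem.List.pyRange_one_eq_nil (by omega)]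
    simp only [pvNameLoopA, List.filter_nil, List.getLast?_nil]
    rw [if_neg (by decide), if_neg (by decide), if_neg (by decide), if_neg (by decide)]
  · obtain ⟨m, hm⟩ : ∃ m, s1.toList.length = m + 1 := ⟨s1.toList.length - 1, by omega⟩
    have hclen : (s1.toList.length : Int) = (m : Int) + 1 := by rw [hm]; push_cast; ring
    rw [show (s1.toList.length : Int) - 1 = (m : Int) by omega]
    rw [pvNameLoop_eq s1.toList s2.toList m false, if_neg (show ¬(false = true) by decide)]
    rw [pvGetLastFilter
      (fun i => PySem.Chars.isdigit (PySem.List.pyGetD s1.toList i ' ')) ((s1.toList.length : Int))]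
    rw [show (s1.toList.length : Int) - 1 = (m : Int) by omega]
    cases hfd : List.find? (fun i => PySem.Chars.isdigit (PySem.List.pyGetD s1.toList i ' '))
        (PySem.List.pyRange (m : Int) 0 (-1)) with
    | none =>
      refine pvTail_eq s1 s2 m hm ?_
      rcases hpre with h1 | h2 | h3
      · exfalso
        obtain ⟨s0, _, _, q, hqmem, _, hq⟩ := h1
        have hmem := PySem.List.mem_pyRange_one.mp hqmem
        have hqd : q ∈ PySem.List.pyRange (m : Int) 0 (-1) := (pvMemDesc _ _).mpr (by omega)
        exact absurd hq (by simpa using List.find?_eq_none.mp hfd q hqd)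
      · exact Or.inl h2
      · exact Or.inr h3
    | some d =>
      simp only []
      rw [pvGetLastFilter (fun s => PySem.Chars.isspace (PySem.List.pyGetD s1.toList s ' ')) d]
      cases hfs : List.find? (fun i => PySem.Chars.isspace (PySem.List.pyGetD s1.toList i ' '))
          (PySem.List.pyRange (d - 1) 0 (-1)) with
      | some s0 => rfl
      | none =>
        refine pvTail_eq s1 s2 m hm ?_
        rcases hpre with h1 | h2 | h3
        · exfalso
          obtain ⟨s0, hs0mem, hs0, q, hqmem, hlt, hq⟩ := h1
          have hmemq := PySem.List.mem_pyRange_one.mp hqmem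
          have hmems := PySem.List.mem_pyRange_one.mp hs0mem
          have hqled : q ≤ d := by
            by_contra hgt
            have := pvFindDescMax _ m d hfd q (by omega) (by omega)
            rw [hq] at this
            exact absurd this (by decide)
          have hs0mem' : s0 ∈ PySem.List.pyRange (d - 1) 0 (-1) := (pvMemDesc _ _).mpr (by omega)
          exact absurd hs0 (by simpa using List.find?_eq_none.mp hfs s0 hs0mem')
        · exact Or.inl h2
        · exact Or.inr h3
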